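-- pv_equiv track=rewrite | github.com/williamqin123/python | AIbot/conversation-analysis.py | findPatternInSentences
-- ===== SOURCE A (Python) =====
-- def findPatternInSentences(sentences):
-- 	deconstructedSentences = []
-- 	totalWords = []
-- 	for sentence in sentences:
-- 		words = sentence.split()
-- 		deconstructedSentences.append(words)
--
-- 	commonWords = deconstructedSentences[0]
-- 	for sentence in deconstructedSentences:
-- 		commonWords = set(commonWords).intersection(sentence)
--
-- 	return commonWords
-- ===== SOURCE B (Python) =====
-- from collections import Counter
--
-- def findPatternInSentences(sentences):
-- 	counts = Counter()
-- 	for sentence in sentences: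
-- 		counts.update(set(sentence.split()))
-- 	return {w for w, c in counts.items() if c == len(sentences)}
-- ===== Notes on version B (the rewrite author's own statement) =====
-- stated objective: alternative
-- what changed: Replaces the repeated set(commonWords).intersection(sentence) passes with one count-and-threshold pass: a Counter is updated with each sentence's word set and the words whose count equals len(sentences) are returned.
import Mathlib
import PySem

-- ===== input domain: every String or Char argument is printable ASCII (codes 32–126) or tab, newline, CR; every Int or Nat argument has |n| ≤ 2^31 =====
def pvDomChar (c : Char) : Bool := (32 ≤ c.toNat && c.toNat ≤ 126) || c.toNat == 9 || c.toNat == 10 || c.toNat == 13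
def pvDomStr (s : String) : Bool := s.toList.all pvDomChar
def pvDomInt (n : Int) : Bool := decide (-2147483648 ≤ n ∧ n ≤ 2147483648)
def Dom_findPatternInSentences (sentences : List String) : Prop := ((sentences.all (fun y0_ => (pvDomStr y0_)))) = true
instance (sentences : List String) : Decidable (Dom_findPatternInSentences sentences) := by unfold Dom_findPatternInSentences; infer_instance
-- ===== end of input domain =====

-- B replaces A's repeated set-intersection passes by one Counter pass with a count = len(sentences) threshold (alternative decomposition, same asymptotic cost).

-- ===== PORT A =====
def findPatternInSentences (sentences : List String) : List String :=
  let deconstructedSentences : List (List String) :=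
    sentences.foldl (fun acc sentence => acc ++ [PySem.Str.split₀ sentence]) []
  -- deconstructedSentences[0]: IndexError on the empty list, excluded by Pre_ (.getD [] is unreachable there)
  let commonWords : List String := (PySem.List.pyGet? deconstructedSentences 0).getD []
  deconstructedSentences.foldl
    (fun commonWords sentence => PySem.Set.inter (PySem.Set.ofList commonWords) sentence)
    commonWords

-- ===== PORT B =====
def findPatternInSentences_alt (sentences : List String) : List String :=
  let counts : PySem.Dict String Int :=
    sentences.foldl
      (fun counts sentence =>
        (PySem.Set.ofList (PySem.Str.split₀ sentence)).foldl
          (fun d w => d.modify w 0 (· + 1)) counts)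
      PySem.Dict.empty
  PySem.Set.ofList
    ((counts.items.filter (fun p => p.2 == (sentences.length : Int))).map Prod.fst)

-- ===== PRECONDITION & SPEC =====
-- Pre_ excludes only the empty list, on which A raises IndexError at deconstructedSentences[0].
def Pre_findPatternInSentences (sentences : List String) : Prop := sentences ≠ []
instance (sentences : List String) : Decidable (Pre_findPatternInSentences sentences) := by unfold Pre_findPatternInSentences; infer_instance
def pvWitness_findPatternInSentences : List String := ["b a c", "a b"]

def Spec_findPatternInSentences (sentences : List String) (out : List String) : Prop := out = findPatternInSentences_alt sentences
instance (sentences : List String) (out : List String) : Decidable (Spec_findPatternInSentences sentences out) := by unfold Spec_findPatternInSentences; infer_instance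

-- ===== CLAIM (what is proved, stated in full; the proofs are below) =====
def Claim_equal_findPatternInSentences : Prop := ∀ (sentences : List String), Dom_findPatternInSentences sentences → Pre_findPatternInSentences sentences → Spec_findPatternInSentences sentences (findPatternInSentences sentences)

-- ===== LEMMAS AND PROOFS =====

-- A's intersection loop over word lists L, started from a duplicate-free list c, filters c by membership in every element of L.
theorem interFold (L : List (List String)) (c : List String) (hc : c.Nodup) :
    L.foldl (fun commonWords sentence => PySem.Set.inter (PySem.Set.ofList commonWords) sentence) c
      = c.filter (fun w => L.all (fun sent => sent.contains w)) := by
  induction L generalizing c with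
  | nil => simp
  | cons l L ih =>
    have h1 : (PySem.Set.ofList c).inter l = c.filter (fun w => l.contains w) := by
      rw [PySem.Set.ofList_eq_self_of_nodup _ hc]; rfl
    rw [List.foldl_cons, h1, ih _ (hc.filter _), List.filter_filter]
    apply List.filter_congr
    intro w _
    simp [Bool.and_comm]

-- the concatenation of the per-sentence word sets counts each word once per sentence containing it
theorem countFlatten (ss : List String) (w : String) :
    ((ss.map (fun s => (PySem.Set.ofList (PySem.Str.split₀ s) : List String))).flatten).count w
      = ss.countP (fun s => (PySem.Str.split₀ s).contains w) := by
  induction ss with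
  | nil => simp
  | cons s ss ih =>
    rw [List.map_cons, List.flatten_cons, List.count_append, ih, List.countP_cons]
    by_cases hw : w ∈ PySem.Set.ofList (PySem.Str.split₀ s)
    · have h1 : (PySem.Set.ofList (PySem.Str.split₀ s)).count w = 1 :=
        List.count_eq_one_of_mem (PySem.Set.nodup_ofList _) hw
      have h2 : (PySem.Str.split₀ s).contains w = true := by
        simpa [PySem.Set.mem_ofList] using hw
      rw [h1, h2]; simp [Nat.add_comm]
    · have h1 : (PySem.Set.ofList (PySem.Str.split₀ s)).count w = 0 :=
        List.count_eq_zero_of_not_mem hw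
      have h2 : (PySem.Str.split₀ s).contains w = false := by
        simp only [PySem.Set.mem_ofList] at hw
        simpa using hw
      rw [h1, h2]; simp


-- A evaluated: the first sentence's word set filtered by membership in every sentence
theorem A_eval (s0 : String) (rest : List String) :
    findPatternInSentences (s0 :: rest)
      = (PySem.Set.ofList (PySem.Str.split₀ s0)).filter
          (fun w => (s0 :: rest).all (fun s => (PySem.Str.split₀ s).contains w)) := by
  unfold findPatternInSentences
  rw [PySem.List.foldl_append_singleton_eq_map]
  simp only [List.nil_append, List.map_cons, PySem.List.pyGet?, PySem.List.pyIdx?]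
  norm_num
  have hfirst : (PySem.Set.ofList (PySem.Str.split₀ s0)).inter (PySem.Str.split₀ s0)
      = PySem.Set.ofList (PySem.Str.split₀ s0) := by
    apply List.filter_eq_self.mpr
    intro w hw
    simpa [List.contains_iff_mem] using ((PySem.Set.mem_ofList _ _).mp hw)
  rw [hfirst, interFold _ _ (PySem.Set.nodup_ofList _)]
  apply List.filter_congr
  intro w hw
  have hw0 : (PySem.Str.split₀ s0).contains w = true := by
    simpa [List.contains_iff_mem] using (PySem.Set.mem_ofList _ _).mp hw
  have hw' : w ∈ PySem.Str.split₀ s0 := (PySem.Set.mem_ofList _ _).mp hw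
  simp [Function.comp_def, hw']

-- B evaluated: the set of all words filtered by membership in every sentence
theorem B_eval (ss : List String) :
    findPatternInSentences_alt ss
      = (PySem.Set.ofList ((ss.map (fun s => (PySem.Set.ofList (PySem.Str.split₀ s) : List String))).flatten)).filter
          (fun w => ss.all (fun s => (PySem.Str.split₀ s).contains w)) := by
  unfold findPatternInSentences_alt
  have hcounts :
      ss.foldl
        (fun counts sentence =>
          (PySem.Set.ofList (PySem.Str.split₀ sentence)).foldl
            (fun d w => d.modify w 0 (· + 1)) counts)
        PySem.Dict.empty
      = PySem.Dict.counter ((ss.map (fun s => (PySem.Set.ofList (PySem.Str.split₀ s) : List String))).flatten) := by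
    rw [PySem.Dict.counter_eq_foldl, List.foldl_flatten, List.foldl_map]
  rw [hcounts]
  simp only [PySem.Dict.items_counter, List.filter_map, List.map_map]
  have hfst : (Prod.fst ∘ fun k => (k, ((((ss.map (fun s => (PySem.Set.ofList (PySem.Str.split₀ s) : List String))).flatten).count k : Nat) : Int))) = id := rfl
  rw [hfst, List.map_id,
    PySem.Set.ofList_eq_self_of_nodup _ (List.Nodup.filter _ (PySem.Set.nodup_ofList _))]
  apply List.filter_congr
  intro w _
  rw [Bool.eq_iff_iff]
  simp only [Function.comp_apply, beq_iff_eq, Nat.cast_inj, List.all_eq_true]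
  rw [countFlatten, List.countP_eq_length]

-- ===== VERDICT (by name: the statement is the Claim_ definition above) =====
theorem findPatternInSentences_spec : Claim_equal_findPatternInSentences := by
  intro sentences _ hpre
  unfold Spec_findPatternInSentences
  obtain ⟨s0, rest, rfl⟩ : ∃ s0 rest, sentences = s0 :: rest := by
    cases sentences with
    | nil => exact absurd rfl hpre
    | cons a t => exact ⟨a, t, rfl⟩
  rw [A_eval, B_eval]
  have hsplit : PySem.Set.ofList (((s0 :: rest).map (fun s => (PySem.Set.ofList (PySem.Str.split₀ s) : List String))).flatten)
      = PySem.Set.ofList (PySem.Str.split₀ s0)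
        ++ (PySem.Set.ofList ((rest.map (fun s => (PySem.Set.ofList (PySem.Str.split₀ s) : List String))).flatten)).filter
             (fun y => !(PySem.Set.contains (PySem.Set.ofList (PySem.Str.split₀ s0)) y)) := by
    rw [List.map_cons, List.flatten_cons, PySem.Set.ofList_append,
      PySem.Set.update_eq_append_filter, PySem.Set.ofList_ofList]
  rw [hsplit, List.filter_append]
  have hnil : ((PySem.Set.ofList ((rest.map (fun s => (PySem.Set.ofList (PySem.Str.split₀ s) : List String))).flatten)).filter
      (fun y => !(PySem.Set.contains (PySem.Set.ofList (PySem.Str.split₀ s0)) y))).filter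
        (fun w => (s0 :: rest).all (fun s => (PySem.Str.split₀ s).contains w)) = [] := by
    rw [List.filter_eq_nil_iff]
    intro w hw
    rw [List.mem_filter] at hw
    have hnot : w ∉ PySem.Str.split₀ s0 := by
      have := hw.2
      simp only [Bool.not_eq_true'] at this
      intro hmem
      rw [(PySem.Set.contains_iff _ _).mpr ((PySem.Set.mem_ofList _ _).mpr hmem)] at this
      exact Bool.noConfusion this
    intro hpw
    have hin : (PySem.Str.split₀ s0).contains w = true := by
      simp only [List.all_eq_true] at hpw
      exact hpw s0 (List.mem_cons_self ..)
    exact hnot (by simpa [List.contains_iff_mem] using hin)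
  rw [hnil, List.append_nil]
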